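-- pv_equiv track=rewrite | github.com/01001011-01000100/Steam-parser | main.py | replace_special
-- ===== SOURCE A (Python) =====
-- def replace_special(url):
--     replacements = {
--         '%20': ' ', '%22': '\"', '%26': "&",
--         '%27': '\'', '%28': '(', '%29': ')',
--         '%3A': ':', '%60': '`', '%7C': '|',
--     }
--
--     for old, new in replacements.items():
--         url = url.replace(old, new)
--     return url
-- ===== SOURCE B (Python) =====
-- def replace_special(url):
--     replacements = {
--         '%20': ' ', '%22': '"', '%26': "&",
--         '%27': "'", '%28': '(', '%29': ')',
--         '%3A': ':', '%60': '`', '%7C': '|',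
--     }
--     out = []
--     i = 0
--     n = len(url)
--     while i < n:
--         if url[i] == '%':
--             ch = replacements.get(url[i:i + 3])
--             if ch is not None:
--                 out.append(ch)
--                 i += 3
--                 continue
--         out.append(url[i])
--         i += 1
--     return ''.join(out)
-- ===== Notes on version B (the rewrite author's own statement) =====
-- stated objective: alternative
-- what changed: Nine sequential full-string str.replace passes are replaced by a single left-to-right scan that looks each percent-escape triple up in the escape table once; correctness rests on the patterns never overlapping and replacements never creating new matches.
import Mathlib
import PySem

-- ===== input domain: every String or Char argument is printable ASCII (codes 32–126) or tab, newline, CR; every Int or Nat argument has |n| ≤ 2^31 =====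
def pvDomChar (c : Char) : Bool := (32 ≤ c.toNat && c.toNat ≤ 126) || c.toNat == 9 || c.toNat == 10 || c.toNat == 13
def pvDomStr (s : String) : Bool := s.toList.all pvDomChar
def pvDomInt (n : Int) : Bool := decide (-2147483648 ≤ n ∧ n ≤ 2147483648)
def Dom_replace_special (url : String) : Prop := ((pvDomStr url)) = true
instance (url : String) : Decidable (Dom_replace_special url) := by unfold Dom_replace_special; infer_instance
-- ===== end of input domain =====

-- B replaces A's nine sequential full-string str.replace passes by a single left-to-right
-- scan with a table lookup (alternative decomposition; equivalence proved for all strings).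

-- ===== PORT A =====
-- the dict of replacements, in Python's insertion order
def pvRepls : List (String × String) :=
  [("%20", " "), ("%22", "\""), ("%26", "&"),
   ("%27", "'"), ("%28", "("), ("%29", ")"),
   ("%3A", ":"), ("%60", "`"), ("%7C", "|")]

-- 'for old, new in replacements.items(): url = url.replace(old, new)'
def replace_special (url : String) : String :=
  pvRepls.foldl (fun u p => PySem.Str.replace u p.1 p.2) url

-- ===== PORT B =====
-- the same escape table, as ('%' x y, decoded char) on the character level
def pvTable : List (Char × Char × Char) :=
  [('2', '0', ' '), ('2', '2', '"'), ('2', '6', '&'),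
   ('2', '7', '\''), ('2', '8', '('), ('2', '9', ')'),
   ('3', 'A', ':'), ('6', '0', '`'), ('7', 'C', '|')]

-- replacements.get(url[i:i+3]) : first-match lookup of the two chars after '%'
def pvLook : List (Char × Char × Char) → Char → Char → Option Char
  | [], _, _ => none
  | (a, b, c) :: T, x, y => if x = a ∧ y = b then some c else pvLook T x y

-- the single left-to-right scan of Source B's while loop: on '%' try the 3-char escape, else copy one char
def pvScan (T : List (Char × Char × Char)) : List Char → List Char
  | [] => []
  | '%' :: x :: y :: r =>
    match pvLook T x y with
    | some d => d :: pvScan T r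
    | none => '%' :: pvScan T (x :: y :: r)
  | c :: r => c :: pvScan T r

def replace_special_alt (url : String) : String :=
  String.ofList (pvScan pvTable url.toList)

-- ===== PRECONDITION & SPEC =====
def Spec_replace_special (url : String) (out : String) : Prop := out = replace_special_alt url
instance (url : String) (out : String) : Decidable (Spec_replace_special url out) := by unfold Spec_replace_special; infer_instance

-- ===== CLAIM (what is proved, stated in full; the proofs are below) =====
def Claim_equal_replace_special : Prop := ∀ (url : String), Dom_replace_special url → Spec_replace_special url (replace_special url)

-- ===== LEMMAS AND PROOFS =====

-- natural recursion equivalent to PySem.Chars.replace (for nonempty pattern)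
def pvRepl (old new : List Char) : List Char → List Char
  | [] => []
  | c :: t =>
    if old.isPrefixOf (c :: t) then new ++ pvRepl old new (t.drop (old.length - 1))
    else c :: pvRepl old new t
termination_by l => l.length
decreasing_by
  all_goals simp [List.length_drop]

lemma pvRepl_go (old new : List Char) (hold : old ≠ []) :
    ∀ fuel l acc, l.length ≤ fuel →
      PySem.Chars.replace.go old new fuel l acc = acc.reverse ++ pvRepl old new l := by
  intro fuel
  induction fuel with
  | zero =>
    intro l acc hl
    have : l = [] := List.eq_nil_of_length_eq_zero (Nat.le_zero.mp hl)
    subst this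
    simp [PySem.Chars.replace.go, pvRepl]
  | succ n ih =>
    intro l acc hl
    match l with
    | [] => simp [PySem.Chars.replace.go, pvRepl]
    | c :: t =>
      have hlen : 1 ≤ old.length := by
        cases old with
        | nil => exact absurd rfl hold
        | cons a o => simp
      have hl' : t.length + 1 ≤ n + 1 := by simpa using hl
      rw [PySem.Chars.replace.go]
      by_cases hp : old.isPrefixOf (c :: t)
      · have h1 : (List.drop old.length (c :: t)).length ≤ n := by
          simp [List.length_drop]; omega
        rw [if_pos hp, ih _ _ h1, pvRepl, if_pos hp]
        have hdrop : List.drop old.length (c :: t) = t.drop (old.length - 1) := by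
          cases old with
          | nil => exact absurd rfl hold
          | cons a o => simp
        rw [hdrop]
        simp
      · rw [if_neg hp, ih _ _ (by omega), pvRepl, if_neg hp]
        simp

lemma replace_eq_pvRepl (s old new : List Char) (hold : old ≠ []) :
    PySem.Chars.replace s old new = pvRepl old new s := by
  rw [PySem.Chars.replace]
  simp only [List.isEmpty_eq_false_iff.mpr hold]
  simpa using pvRepl_go old new hold s.length s [] le_rfl

lemma pvLook_mem {T : List (Char × Char × Char)} {x y d : Char}
    (h : pvLook T x y = some d) : ∃ e ∈ T, e.2.2 = d := by
  induction T with
  | nil => simp [pvLook] at h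
  | cons e T ih =>
    obtain ⟨a, b, c⟩ := e
    rw [pvLook] at h
    split at h
    · exact ⟨(a, b, c), by simp, by simpa using h⟩
    · obtain ⟨e', he', hd⟩ := ih h
      exact ⟨e', by simp [he'], hd⟩

lemma pvLook_append_some (T₁ T₂ : List (Char × Char × Char)) {x y d : Char}
    (h : pvLook T₁ x y = some d) : pvLook (T₁ ++ T₂) x y = some d := by
  induction T₁ with
  | nil => simp [pvLook] at h
  | cons e T ih =>
    obtain ⟨a, b, c⟩ := e
    by_cases hxy : x = a ∧ y = b
    · simp [pvLook, hxy] at h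
      simp [pvLook, hxy, h]
    · simp [pvLook, hxy] at h
      simp [pvLook, hxy, ih h]

lemma pvLook_append_none (T₁ T₂ : List (Char × Char × Char)) {x y : Char}
    (h : pvLook T₁ x y = none) :
    pvLook (T₁ ++ T₂) x y = pvLook T₂ x y := by
  induction T₁ with
  | nil => rfl
  | cons e T ih =>
    obtain ⟨a, b, c⟩ := e
    by_cases hxy : x = a ∧ y = b
    · simp [pvLook, hxy] at h
    · simp [pvLook, hxy] at h
      simp [pvLook, hxy, ih h]

-- small unfolding lemmas for pvScan
lemma pvScan_nil (T : List (Char × Char × Char)) : pvScan T [] = [] := by rw [pvScan]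

lemma pvScan_cons_ne (T : List (Char × Char × Char)) {u : Char} (r : List Char)
    (hu : u ≠ '%') : pvScan T (u :: r) = u :: pvScan T r := by
  rw [pvScan.eq_def]
  cases r with
  | nil => simp_all
  | cons v r' => cases r' <;> simp_all

lemma pvScan_pct_nil (T : List (Char × Char × Char)) : pvScan T ['%'] = ['%'] := by
  rw [pvScan.eq_def]; simp [pvScan_nil]

lemma pvScan_pct_one (T : List (Char × Char × Char)) (x : Char) :
    pvScan T ['%', x] = '%' :: pvScan T [x] := by
  rw [pvScan.eq_def]; simp

lemma pvScan_match (T : List (Char × Char × Char)) {x y d : Char} (r : List Char)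
    (h : pvLook T x y = some d) : pvScan T ('%' :: x :: y :: r) = d :: pvScan T r := by
  rw [pvScan, h]

lemma pvScan_nomatch (T : List (Char × Char × Char)) {x y : Char} (r : List Char)
    (h : pvLook T x y = none) :
    pvScan T ('%' :: x :: y :: r) = '%' :: pvScan T (x :: y :: r) := by
  rw [pvScan, h]

lemma pvScan_one (T : List (Char × Char × Char)) (x : Char) : pvScan T [x] = [x] := by
  by_cases hx : x = '%'
  · subst hx; exact pvScan_pct_nil T
  · rw [pvScan_cons_ne T [] hx, pvScan_nil]

-- the head of a scan of a nonempty string: the first input char, or (after '%') a replacement char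
lemma pvScan_cons_head (T : List (Char × Char × Char)) (u : Char) (w : List Char) :
    ∃ h t, pvScan T (u :: w) = h :: t ∧ (h = u ∨ (u = '%' ∧ ∃ e ∈ T, e.2.2 = h)) := by
  by_cases hu : u = '%'
  · subst hu
    match w with
    | [] => exact ⟨'%', _, pvScan_pct_nil T, Or.inl rfl⟩
    | [x] => exact ⟨'%', _, pvScan_pct_one T x, Or.inl rfl⟩
    | x :: y :: r =>
      cases hl : pvLook T x y with
      | some d =>
        exact ⟨d, _, pvScan_match T r hl, Or.inr ⟨rfl, pvLook_mem hl⟩⟩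
      | none => exact ⟨'%', _, pvScan_nomatch T r hl, Or.inl rfl⟩
  · exact ⟨u, _, pvScan_cons_ne T w hu, Or.inl rfl⟩

-- the replace pattern never matches '%' followed by a scan that found no escape at its start
lemma pvScan_prefix_false (a b : Char) (T : List (Char × Char × Char))
    (ha : a ≠ '%') (_hb : b ≠ '%')
    (hT : ∀ e ∈ T, e.2.2 ≠ '%' ∧ e.2.2 ≠ a ∧ e.2.2 ≠ b)
    (x y : Char) (r' : List Char) (hxy : ¬(x = a ∧ y = b)) :
    (['%', a, b] : List Char).isPrefixOf ('%' :: pvScan T (x :: y :: r')) = false := by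
  by_cases hx : x = '%'
  · subst hx
    obtain ⟨h, t, hsc, hh⟩ := pvScan_cons_head T '%' (y :: r')
    rw [hsc]
    have hha : h ≠ a := by
      rcases hh with h1 | ⟨_, e, he, heq⟩
      · subst h1; exact fun hc => ha hc.symm
      · exact heq ▸ (hT e he).2.1
    simp [List.isPrefixOf]
    intro h'
    exact absurd h'.symm hha
  · rw [pvScan_cons_ne T _ hx]
    by_cases hxa : x = a
    · have hyb : y ≠ b := fun h => hxy ⟨hxa, h⟩
      obtain ⟨h2, t2, hsc2, hh2⟩ := pvScan_cons_head T y r'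
      rw [hsc2]
      have hb2 : h2 ≠ b := by
        rcases hh2 with h1 | ⟨hy', e, he, heq⟩
        · subst h1; exact hyb
        · exact heq ▸ (hT e he).2.2
      simp [List.isPrefixOf]
      intro _ h'
      exact absurd h'.symm hb2
    · simp [List.isPrefixOf]
      intro h'
      exact absurd h'.symm hxa

-- key lemma: applying one more str.replace to the scan result extends the scan's table
lemma pvScan_step (a b c : Char) (T : List (Char × Char × Char))
    (ha : a ≠ '%') (hb : b ≠ '%')
    (hT : ∀ e ∈ T, e.2.2 ≠ '%' ∧ e.2.2 ≠ a ∧ e.2.2 ≠ b) :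
    ∀ s, pvRepl ['%', a, b] [c] (pvScan T s) = pvScan (T ++ [(a, b, c)]) s := by
  suffices H : ∀ n s, s.length ≤ n →
      pvRepl ['%', a, b] [c] (pvScan T s) = pvScan (T ++ [(a, b, c)]) s from
    fun s => H s.length s le_rfl
  intro n
  induction n with
  | zero =>
    intro s hs
    have : s = [] := List.eq_nil_of_length_eq_zero (Nat.le_zero.mp hs)
    subst this
    simp [pvScan_nil, pvRepl]
  | succ n ih =>
    intro s hs
    match s with
    | [] => simp [pvScan_nil, pvRepl]
    | u :: r =>
      by_cases hu : u = '%'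
      · subst hu
        match r with
        | [] =>
          rw [pvScan_pct_nil, pvScan_pct_nil, pvRepl]
          simp [List.isPrefixOf, pvRepl]
        | [x] =>
          rw [pvScan_pct_one, pvScan_pct_one, pvScan_one, pvScan_one, pvRepl]
          have hpf : (['%', a, b] : List Char).isPrefixOf ['%', x] = false := by
            simp [List.isPrefixOf]
          rw [hpf]
          simp [pvRepl, List.isPrefixOf]
        | x :: y :: r' =>
          have hr' : r'.length ≤ n := by simp at hs; omega
          have hr2 : (x :: y :: r').length ≤ n := by simp at hs ⊢; omega
          cases hl : pvLook T x y with
          | some d =>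
            obtain ⟨e, he, hd⟩ := pvLook_mem hl
            have hd' : d ≠ '%' := hd ▸ (hT e he).1
            rw [pvScan_match T r' hl, pvScan_match (T ++ [(a, b, c)]) r' (pvLook_append_some T _ hl)]
            rw [pvRepl]
            have hpf : (['%', a, b] : List Char).isPrefixOf (d :: pvScan T r') = false := by
              simp [List.isPrefixOf]
              intro h'
              exact absurd h'.symm hd'
            rw [hpf]
            simp only [Bool.false_eq_true, if_false]
            rw [ih r' hr']
          | none =>
            rw [pvScan_nomatch T r' hl]
            by_cases hxy : x = a ∧ y = b
            · obtain ⟨rfl, rfl⟩ := hxy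
              rw [pvScan_cons_ne T _ ha, pvScan_cons_ne T _ hb]
              rw [pvRepl]
              have hpf : (['%', x, y] : List Char).isPrefixOf ('%' :: x :: y :: pvScan T r') = true := by
                simp [List.isPrefixOf]
              rw [hpf]
              simp only [if_true]
              have hlook' : pvLook (T ++ [(x, y, c)]) x y = some c := by
                rw [pvLook_append_none T _ hl]
                simp [pvLook]
              rw [pvScan_match (T ++ [(x, y, c)]) r' hlook']
              have hdrop : List.drop ((['%', x, y] : List Char).length - 1) (x :: y :: pvScan T r') = pvScan T r' := by
                simp
              rw [hdrop, ih r' hr']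
              simp
            · have hlook' : pvLook (T ++ [(a, b, c)]) x y = none := by
                rw [pvLook_append_none T _ hl]
                simp [pvLook, hxy]
              rw [pvScan_nomatch (T ++ [(a, b, c)]) r' hlook']
              rw [pvRepl, pvScan_prefix_false a b T ha hb hT x y r' hxy]
              simp only [Bool.false_eq_true, if_false]
              rw [ih (x :: y :: r') hr2]
      · rw [pvScan_cons_ne T r hu, pvScan_cons_ne (T ++ [(a, b, c)]) r hu, pvRepl]
        have hpf : (['%', a, b] : List Char).isPrefixOf (u :: pvScan T r) = false := by
          simp [List.isPrefixOf]
          intro h'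
          exact absurd h'.symm hu
        rw [hpf]
        simp only [Bool.false_eq_true, if_false]
        rw [ih r (by simp at hs; omega)]

-- scanning with the empty table copies the string
lemma pvScan_nil_table : ∀ s, pvScan [] s = s := by
  intro s
  induction s using pvScan.induct [] with
  | case1 => exact pvScan_nil []
  | case2 x y r d hl ih => simp [pvLook] at hl
  | case3 x y r hl ih => rw [pvScan_nomatch [] r hl, ih]
  | case4 c r hne ih =>
    by_cases hc : c = '%'
    · subst hc
      match r, hne with
      | [], _ => exact pvScan_pct_nil []
      | [x], _ => rw [pvScan_pct_one, pvScan_one]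
      | x :: y :: r', hne => exact (hne x y r' rfl rfl).elim
    · rw [pvScan_cons_ne _ _ hc, ih]

-- A's nine replaces, read on the character level
lemma replace_special_toList (url : String) :
    (replace_special url).toList =
      pvRepl ['%', '7', 'C'] ['|'] (pvRepl ['%', '6', '0'] ['`']
        (pvRepl ['%', '3', 'A'] [':'] (pvRepl ['%', '2', '9'] [')']
          (pvRepl ['%', '2', '8'] ['('] (pvRepl ['%', '2', '7'] ['\'']
            (pvRepl ['%', '2', '6'] ['&'] (pvRepl ['%', '2', '2'] ['"']
              (pvRepl ['%', '2', '0'] [' '] url.toList)))))))) := by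
  show (PySem.Str.replace _ _ _).toList = _
  simp only [PySem.Str.toList_replace]
  rw [replace_eq_pvRepl _ _ _ (by decide), replace_eq_pvRepl _ _ _ (by decide),
      replace_eq_pvRepl _ _ _ (by decide), replace_eq_pvRepl _ _ _ (by decide),
      replace_eq_pvRepl _ _ _ (by decide), replace_eq_pvRepl _ _ _ (by decide),
      replace_eq_pvRepl _ _ _ (by decide), replace_eq_pvRepl _ _ _ (by decide),
      replace_eq_pvRepl _ _ _ (by decide)]
  rfl

lemma replace_special_toList_scan (url : String) :
    (replace_special url).toList = pvScan pvTable url.toList := by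
  rw [replace_special_toList]
  have h0 : pvRepl ['%', '2', '0'] [' '] url.toList = pvScan [('2', '0', ' ')] url.toList := by
    have h := pvScan_step '2' '0' ' ' [] (by decide) (by decide) (by simp) url.toList
    rwa [pvScan_nil_table] at h
  rw [h0,
    pvScan_step '2' '2' '"' [('2', '0', ' ')] (by decide) (by decide) (by decide) url.toList,
    pvScan_step '2' '6' '&' _ (by decide) (by decide) (by decide) url.toList,
    pvScan_step '2' '7' '\'' _ (by decide) (by decide) (by decide) url.toList,
    pvScan_step '2' '8' '(' _ (by decide) (by decide) (by decide) url.toList,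
    pvScan_step '2' '9' ')' _ (by decide) (by decide) (by decide) url.toList,
    pvScan_step '3' 'A' ':' _ (by decide) (by decide) (by decide) url.toList,
    pvScan_step '6' '0' '`' _ (by decide) (by decide) (by decide) url.toList,
    pvScan_step '7' 'C' '|' _ (by decide) (by decide) (by decide) url.toList]
  rfl

-- ===== VERDICT (by name: the statement is the Claim_ definition above) =====
theorem replace_special_spec : Claim_equal_replace_special := by
  intro url _
  unfold Spec_replace_special replace_special_alt
  apply String.toList_inj.mp
  rw [replace_special_toList_scan]
  simp
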